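-- pv_equiv track=rewrite | github.com/AndreVazao/devops-god-mode | backend/app/services/ai_chat_webservice_audit_service.py | _recommended_phases
-- ===== SOURCE A (Python) =====
-- from typing import Any, Dict, List
--
-- def _recommended_phases(failed: List[Dict[str, Any]]) -> List[Dict[str, Any]]:
--     needed = {item["id"] for item in failed}
--     phases: List[Dict[str, Any]] = []
--     if needed & {"external_ai_registry", "external_chat_open_session"}:
--         phases.append({"phase": "external_ai_registry_and_session", "label": "Criar registo de IAs externas e sessões controladas"})
--     if needed & {"external_chat_read_visible_messages", "external_chat_scroll_history"}:
--         phases.append({"phase": "external_chat_reader_scroll", "label": "Criar leitor de mensagens e scroll de histórico"})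
--     if needed & {"external_chat_send_prompt", "external_chat_wait_for_response", "external_chat_extract_response"}:
--         phases.append({"phase": "external_chat_prompt_response", "label": "Criar envio de prompt e extração de resposta"})
--     if needed & {"external_chat_safety_gate"}:
--         phases.append({"phase": "external_chat_safety_gate", "label": "Criar gate de segurança para prompts externos"})
--     return phases
-- ===== SOURCE B (Python) =====
-- from typing import Any, Dict, List
--
-- _PHASES: List[Dict[str, Any]] = [
--     {"phase": "external_ai_registry_and_session", "label": "Criar registo de IAs externas e sessões controladas"},
--     {"phase": "external_chat_reader_scroll", "label": "Criar leitor de mensagens e scroll de histórico"},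
--     {"phase": "external_chat_prompt_response", "label": "Criar envio de prompt e extração de resposta"},
--     {"phase": "external_chat_safety_gate", "label": "Criar gate de segurança para prompts externos"},
-- ]
--
-- _TRIGGER_TO_IDX: Dict[str, int] = {
--     "external_ai_registry": 0,
--     "external_chat_open_session": 0,
--     "external_chat_read_visible_messages": 1,
--     "external_chat_scroll_history": 1,
--     "external_chat_send_prompt": 2,
--     "external_chat_wait_for_response": 2,
--     "external_chat_extract_response": 2,
--     "external_chat_safety_gate": 3,
-- }
--
-- def _recommended_phases(failed: List[Dict[str, Any]]) -> List[Dict[str, Any]]: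
--     hit = [False] * len(_PHASES)
--     for item in failed:
--         idx = _TRIGGER_TO_IDX.get(item["id"])
--         if idx is not None:
--             hit[idx] = True
--     return [phase for phase, h in zip(_PHASES, hit) if h]
-- ===== Notes on version B (the rewrite author's own statement) =====
-- stated objective: simpler
-- what changed: Replaces the id-set plus four hardcoded set-intersection branches by an inverted index (trigger id -> phase index): one pass over the failed items sets hit flags via a single dict lookup per item, then the hit phases are emitted in table order; no set is ever built or intersected.
import Mathlib
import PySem

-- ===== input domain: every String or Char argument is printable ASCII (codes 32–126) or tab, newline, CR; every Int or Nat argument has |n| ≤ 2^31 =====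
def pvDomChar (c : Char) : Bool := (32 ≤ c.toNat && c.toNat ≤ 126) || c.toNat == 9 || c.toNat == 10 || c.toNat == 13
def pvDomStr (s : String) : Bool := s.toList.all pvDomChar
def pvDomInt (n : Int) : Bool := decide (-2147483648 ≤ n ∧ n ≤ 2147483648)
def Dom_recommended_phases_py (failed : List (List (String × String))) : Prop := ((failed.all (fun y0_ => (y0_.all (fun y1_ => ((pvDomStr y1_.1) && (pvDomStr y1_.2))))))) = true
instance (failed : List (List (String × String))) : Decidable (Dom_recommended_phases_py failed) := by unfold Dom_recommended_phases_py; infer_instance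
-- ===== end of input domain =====

-- B replaces A's id-set plus four intersection branches by an inverted index (trigger id →
-- phase index), one pass over the items setting hit flags, then one pass emitting the hit
-- phases (objective: simpler).

-- ===== PORT A =====
def recommended_phases_py (failed : List (List (String × String))) : List (List (String × String)) :=
  -- needed = {item["id"] for item in failed}; item["id"] ported as getD (Pre_ guarantees the key exists)
  let needed : PySem.Set String :=
    PySem.Set.ofList (failed.map (fun item => (PySem.Dict.mk item).getD "id" ""))
  let phases : List (List (String × String)) := []
  let phases := if PySem.Set.inter needed (PySem.Set.ofList ["external_ai_registry", "external_chat_open_session"]) ≠ [] then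
      phases ++ [[("phase", "external_ai_registry_and_session"), ("label", "Criar registo de IAs externas e sessões controladas")]] else phases
  let phases := if PySem.Set.inter needed (PySem.Set.ofList ["external_chat_read_visible_messages", "external_chat_scroll_history"]) ≠ [] then
      phases ++ [[("phase", "external_chat_reader_scroll"), ("label", "Criar leitor de mensagens e scroll de histórico")]] else phases
  let phases := if PySem.Set.inter needed (PySem.Set.ofList ["external_chat_send_prompt", "external_chat_wait_for_response", "external_chat_extract_response"]) ≠ [] then
      phases ++ [[("phase", "external_chat_prompt_response"), ("label", "Criar envio de prompt e extração de resposta")]] else phases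
  let phases := if PySem.Set.inter needed (PySem.Set.ofList ["external_chat_safety_gate"]) ≠ [] then
      phases ++ [[("phase", "external_chat_safety_gate"), ("label", "Criar gate de segurança para prompts externos")]] else phases
  phases

-- ===== PORT B =====
def pvPhases : List (List (String × String)) :=
  [ [("phase", "external_ai_registry_and_session"), ("label", "Criar registo de IAs externas e sessões controladas")],
    [("phase", "external_chat_reader_scroll"), ("label", "Criar leitor de mensagens e scroll de histórico")],
    [("phase", "external_chat_prompt_response"), ("label", "Criar envio de prompt e extração de resposta")],
    [("phase", "external_chat_safety_gate"), ("label", "Criar gate de segurança para prompts externos")] ]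

-- indices kept as Nat: they are the literal nonnegative list indices 0..3 of _PHASES
def pvTriggerToIdx : PySem.Dict String Nat :=
  PySem.Dict.ofList
    [ ("external_ai_registry", 0), ("external_chat_open_session", 0),
      ("external_chat_read_visible_messages", 1), ("external_chat_scroll_history", 1),
      ("external_chat_send_prompt", 2), ("external_chat_wait_for_response", 2),
      ("external_chat_extract_response", 2), ("external_chat_safety_gate", 3) ]

def recommended_phases_py_alt (failed : List (List (String × String))) : List (List (String × String)) :=
  let hit : List Bool :=
    failed.foldl (fun hit item =>
      match PySem.Dict.get? pvTriggerToIdx ((PySem.Dict.mk item).getD "id" "") with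
      | some idx => hit.set idx true
      | none => hit)
      (List.replicate pvPhases.length false)
  ((pvPhases.zip hit).filter (fun p => p.2)).map (fun p => p.1)

-- ===== PRECONDITION & SPEC =====
-- Pre_ excludes items without an "id" key, on which Python A raises KeyError.
def Pre_recommended_phases_py (failed : List (List (String × String))) : Prop :=
  (failed.all (fun item => ((PySem.Dict.mk item).get? "id").isSome)) = true
instance (failed : List (List (String × String))) : Decidable (Pre_recommended_phases_py failed) := by unfold Pre_recommended_phases_py; infer_instance
def pvWitness_recommended_phases_py : (List (List (String × String))) :=
  [[("id", "external_chat_safety_gate")], [("id", "other")]]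

def Spec_recommended_phases_py (failed : List (List (String × String))) (out : List (List (String × String))) : Prop := out = recommended_phases_py_alt failed
instance (failed : List (List (String × String))) (out : List (List (String × String))) : Decidable (Spec_recommended_phases_py failed out) := by unfold Spec_recommended_phases_py; infer_instance

-- ===== CLAIM (what is proved, stated in full; the proofs are below) =====
def Claim_equal_recommended_phases_py : Prop := ∀ (failed : List (List (String × String))), Dom_recommended_phases_py failed → Pre_recommended_phases_py failed → Spec_recommended_phases_py failed (recommended_phases_py failed)

-- ===== LEMMAS AND PROOFS =====

-- the trigger table as a literal Dict.mk (ofList keeps all eight distinct keys)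
theorem pv_table : pvTriggerToIdx = PySem.Dict.mk
    [ ("external_ai_registry", 0), ("external_chat_open_session", 0),
      ("external_chat_read_visible_messages", 1), ("external_chat_scroll_history", 1),
      ("external_chat_send_prompt", 2), ("external_chat_wait_for_response", 2),
      ("external_chat_extract_response", 2), ("external_chat_safety_gate", 3) ] := by decide

-- shorthand used only by the proofs: the id of an item, and "some item's id maps to index i"
def pvId (item : List (String × String)) : String := (PySem.Dict.mk item).getD "id" ""

def pvQ (i : Nat) (failed : List (List (String × String))) : Bool :=
  failed.any (fun item => PySem.Dict.get? pvTriggerToIdx (pvId item) == some i)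

-- get? of the trigger table only returns none or indices 0..3
theorem pv_classify (s : String) :
    PySem.Dict.get? pvTriggerToIdx s = none ∨ PySem.Dict.get? pvTriggerToIdx s = some 0 ∨
    PySem.Dict.get? pvTriggerToIdx s = some 1 ∨ PySem.Dict.get? pvTriggerToIdx s = some 2 ∨
    PySem.Dict.get? pvTriggerToIdx s = some 3 := by
  rw [pv_table]
  simp only [PySem.Dict.get?_mk_cons]
  split_ifs <;> simp [PySem.Dict.get?]

-- the fold over the items turns the four flags into "or of membership"
theorem pv_fold_hit (failed : List (List (String × String))) (b0 b1 b2 b3 : Bool) :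
    failed.foldl (fun hit item =>
      match PySem.Dict.get? pvTriggerToIdx ((PySem.Dict.mk item).getD "id" "") with
      | some idx => hit.set idx true
      | none => hit) [b0, b1, b2, b3]
    = [b0 || pvQ 0 failed, b1 || pvQ 1 failed, b2 || pvQ 2 failed, b3 || pvQ 3 failed] := by
  induction failed generalizing b0 b1 b2 b3 with
  | nil => simp [pvQ]
  | cons hd tl ih =>
    rcases pv_classify (pvId hd) with h | h | h | h | h <;>
      simp only [List.foldl_cons, pvId] at h ⊢ <;> rw [h] <;>
      simp only [List.set, ih] <;>
      simp [pvQ, pvId, h]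

-- membership in trigger set i equals "the table maps the id to i"
theorem pv_contains0 (s : String) :
    PySem.Set.contains (PySem.Set.ofList ["external_ai_registry", "external_chat_open_session"]) s
    = (PySem.Dict.get? pvTriggerToIdx s == some 0) := by
  rw [pv_table]
  simp only [PySem.Dict.get?_mk_cons]
  split_ifs <;> simp_all [PySem.Set.contains, PySem.Dict.get?] <;> simp_all [eq_comm]

theorem pv_contains1 (s : String) :
    PySem.Set.contains (PySem.Set.ofList ["external_chat_read_visible_messages", "external_chat_scroll_history"]) s
    = (PySem.Dict.get? pvTriggerToIdx s == some 1) := by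
  rw [pv_table]
  simp only [PySem.Dict.get?_mk_cons]
  split_ifs <;> simp_all [PySem.Set.contains, PySem.Dict.get?] <;> simp_all [eq_comm]

theorem pv_contains2 (s : String) :
    PySem.Set.contains (PySem.Set.ofList ["external_chat_send_prompt", "external_chat_wait_for_response", "external_chat_extract_response"]) s
    = (PySem.Dict.get? pvTriggerToIdx s == some 2) := by
  rw [pv_table]
  simp only [PySem.Dict.get?_mk_cons]
  split_ifs <;> simp_all [PySem.Set.contains, PySem.Dict.get?] <;> simp_all [eq_comm]

theorem pv_contains3 (s : String) :
    PySem.Set.contains (PySem.Set.ofList ["external_chat_safety_gate"]) s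
    = (PySem.Dict.get? pvTriggerToIdx s == some 3) := by
  rw [pv_table]
  simp only [PySem.Dict.get?_mk_cons]
  split_ifs <;> simp_all [PySem.Set.contains, PySem.Dict.get?] <;> simp_all [eq_comm]

-- A's intersection test for rule i equals pvQ i
theorem pv_cond (t : PySem.Set String) (i : Nat)
    (ht : ∀ s, PySem.Set.contains t s = (PySem.Dict.get? pvTriggerToIdx s == some i))
    (failed : List (List (String × String))) :
    (PySem.Set.inter (PySem.Set.ofList (failed.map (fun item => (PySem.Dict.mk item).getD "id" ""))) t ≠ [])
    ↔ pvQ i failed = true := by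
  simp only [pvQ, pvId, Ne, List.eq_nil_iff_forall_not_mem, not_forall, not_not,
    List.any_eq_true, ← PySem.Set.contains_iff]
  aesop

theorem pv_ports_eq (failed : List (List (String × String))) :
    recommended_phases_py failed = recommended_phases_py_alt failed := by
  unfold recommended_phases_py recommended_phases_py_alt
  simp only [pvPhases, List.length_cons, List.length_nil, List.replicate, pv_fold_hit,
    Bool.false_or, pv_cond _ 0 pv_contains0, pv_cond _ 1 pv_contains1,
    pv_cond _ 2 pv_contains2, pv_cond _ 3 pv_contains3]
  by_cases h0 : pvQ 0 failed = true <;> by_cases h1 : pvQ 1 failed = true <;>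
  by_cases h2 : pvQ 2 failed = true <;> by_cases h3 : pvQ 3 failed = true <;>
    simp [h0, h1, h2, h3, List.zip, List.zipWith, List.filter]

-- ===== VERDICT (by name: the statement is the Claim_ definition above) =====
theorem recommended_phases_py_spec : Claim_equal_recommended_phases_py := by
  intro failed _ _
  exact pv_ports_eq failed
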